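-- pv_equiv track=rewrite | github.com/Krakkow/Droxi.Ai-Assignment | tests_api/test_merge_sync.py | _build_card_description_by_title
-- ===== SOURCE A (Python) =====
-- def _build_card_description_by_title(cards: list[dict]) -> dict[str, str]:
--     """
--     build a mapping from card title to its dexcription.
--     if multiple cards somehow share the same title, we keep the first one.
--     """
--
--     result: dict[str, str] = {}
--
--     for card in cards:
--         title = (card.get("name") or "").strip()
--         desc = card.get("desc", "") or ""
--         if title and title not in result:
--             result[title] = desc
--     return result
-- ===== SOURCE B (Python) =====
-- def _build_card_description_by_title(cards: list[dict]) -> dict[str, str]: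
--     """Staged pipeline: extract the (title, desc) pairs of cards with a
--     non-empty stripped name, resolve duplicate titles by last-write-wins over
--     the reversed pairs (so the earliest description survives), and order the
--     keys by first occurrence with dict.fromkeys."""
--     pairs = [(title, card.get("desc", "") or "")
--              for card in cards
--              if (title := (card.get("name") or "").strip())]
--     desc_of = dict(reversed(pairs))
--     return {title: desc_of[title] for title in dict.fromkeys(t for t, _ in pairs)}
-- ===== Notes on version B (the rewrite author's own statement) =====
-- stated objective: alternative
-- what changed: Replaces the single forward loop with a 'title not in result' membership guard by a staged pipeline: extract the valid (title, desc) pairs, build a lookup dict from the reversed pairs so last-write-wins yields the first occurrence's description, and emit keys in first-occurrence order via dict.fromkeys.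
import Mathlib
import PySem

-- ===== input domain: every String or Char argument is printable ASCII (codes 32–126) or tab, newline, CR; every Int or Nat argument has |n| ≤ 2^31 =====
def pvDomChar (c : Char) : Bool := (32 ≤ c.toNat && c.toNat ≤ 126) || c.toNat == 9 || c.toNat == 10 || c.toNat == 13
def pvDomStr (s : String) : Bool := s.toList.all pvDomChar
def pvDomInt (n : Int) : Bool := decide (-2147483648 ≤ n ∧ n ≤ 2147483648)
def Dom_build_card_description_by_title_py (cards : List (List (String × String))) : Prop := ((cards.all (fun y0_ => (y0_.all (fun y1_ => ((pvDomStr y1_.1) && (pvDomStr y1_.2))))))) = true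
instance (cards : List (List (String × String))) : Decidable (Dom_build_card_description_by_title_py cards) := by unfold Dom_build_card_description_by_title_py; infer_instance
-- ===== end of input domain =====

-- B replaces the guarded forward loop by a staged pipeline (extract pairs; reverse last-write-wins
-- lookup dict; keys in first-occurrence order via dict.fromkeys); same return value, no speed claim.

-- ===== PORT A =====
-- 'card.get("name") or ""' / 'card.get("desc","") or ""': for string values, 'x or ""' is
-- exactly '(get? …).getD ""' (None → "", "" → "", non-empty kept).
def build_card_description_by_title_py (cards : List (List (String × String))) : List (String × String) :=
  (cards.foldl
    (fun (result : PySem.Dict String String) card =>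
      let title := PySem.Str.strip (((PySem.Dict.mk card).get? "name").getD "")
      let desc := ((PySem.Dict.mk card).get? "desc").getD ""
      if title ≠ "" ∧ result.contains title = false then result.insert title desc else result)
    PySem.Dict.empty).items

-- ===== PORT B =====
-- the filtering list comprehension with the walrus title binding
def pvPairs (cards : List (List (String × String))) : List (String × String) :=
  cards.filterMap (fun card =>
    let title := PySem.Str.strip (((PySem.Dict.mk card).get? "name").getD "")
    if title = "" then none
    else some (title, ((PySem.Dict.mk card).get? "desc").getD ""))

-- 'desc_of[title]' cannot raise (every emitted title is a key of desc_of), so its port is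
-- 'get?' followed by an unreachable default.
def build_card_description_by_title_py_alt (cards : List (List (String × String))) : List (String × String) :=
  let pairs := pvPairs cards
  let desc_of := PySem.Dict.ofList pairs.reverse
  (PySem.Dict.ofList
    ((PySem.List.dedup (pairs.map (fun p => p.1))).map
      (fun t => (t, (desc_of.get? t).getD "")))).items

-- ===== PRECONDITION & SPEC =====
def Spec_build_card_description_by_title_py (cards : List (List (String × String))) (out : List (String × String)) : Prop := out = build_card_description_by_title_py_alt cards
instance (cards : List (List (String × String))) (out : List (String × String)) : Decidable (Spec_build_card_description_by_title_py cards out) := by unfold Spec_build_card_description_by_title_py; infer_instance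

-- ===== CLAIM (what is proved, stated in full; the proofs are below) =====
def Claim_equal_build_card_description_by_title_py : Prop := ∀ (cards : List (List (String × String))), Dom_build_card_description_by_title_py cards → Spec_build_card_description_by_title_py cards (build_card_description_by_title_py cards)

-- ===== LEMMAS AND PROOFS =====

-- the (title, desc) pair a card contributes, or none when its stripped name is empty
def pvExtract (card : List (String × String)) : Option (String × String) :=
  let title := PySem.Str.strip (((PySem.Dict.mk card).get? "name").getD "")
  if title = "" then none else some (title, ((PySem.Dict.mk card).get? "desc").getD "")

-- keep the first pair for each key
def pvDedup : List (String × String) → List (String × String)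
  | [] => []
  | p :: rest => p :: (pvDedup rest).filter (fun q => q.1 ≠ p.1)

theorem pvDedup_filter_key (pred : String → Bool) :
    ∀ l : List (String × String),
      pvDedup (l.filter (fun p => pred p.1)) = (pvDedup l).filter (fun p => pred p.1) := by
  intro l
  induction l with
  | nil => rfl
  | cons p l ih =>
    by_cases h : pred p.1 = true
    · simp only [List.filter_cons, h, if_pos trivial, pvDedup, ih, List.filter_filter]
      refine congrArg (p :: ·) (List.filter_congr ?_)
      intro q _; simp [Bool.and_comm]
    · have h' : pred p.1 = false := by simpa using h
      simp only [List.filter_cons, h', Bool.false_eq_true, if_false, pvDedup, ih, List.filter_filter]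
      refine List.filter_congr ?_
      intro q _
      by_cases hq : pred q.1 = true
      · have hne : q.1 ≠ p.1 := fun e => by rw [e, h'] at hq; exact Bool.false_ne_true hq
        simp [hq, hne]
      · simp [Bool.eq_false_iff.mpr hq]

theorem pvA_inv :
    ∀ (cards : List (List (String × String))) (d : PySem.Dict String String),
      (cards.foldl
        (fun (result : PySem.Dict String String) card =>
          let title := PySem.Str.strip (((PySem.Dict.mk card).get? "name").getD "")
          let desc := ((PySem.Dict.mk card).get? "desc").getD ""
          if title ≠ "" ∧ result.contains title = false then result.insert title desc else result)
        d).items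
      = d.items ++ pvDedup ((cards.filterMap pvExtract).filter (fun p => !d.contains p.1)) := by
  intro cards
  induction cards with
  | nil => intro d; simp [pvDedup]
  | cons card cards ih =>
    intro d
    by_cases ht : PySem.Str.strip (((PySem.Dict.mk card).get? "name").getD "") = ""
    · simp only [List.foldl_cons, List.filterMap_cons, pvExtract, ht]
      rw [if_neg (by simp)]
      exact ih d
    · have hex : pvExtract card
        = some (PySem.Str.strip (((PySem.Dict.mk card).get? "name").getD ""),
                ((PySem.Dict.mk card).get? "desc").getD "") := by
        simp [pvExtract, ht]
      by_cases hc : d.contains (PySem.Str.strip (((PySem.Dict.mk card).get? "name").getD "")) = true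
      · simp only [List.foldl_cons, List.filterMap_cons, hex]
        rw [if_neg (by simp [hc])]
        rw [ih d]
        simp [hc]
      · have hc' : d.contains (PySem.Str.strip (((PySem.Dict.mk card).get? "name").getD "")) = false := by
          simpa using hc
        simp only [List.foldl_cons, List.filterMap_cons, hex]
        rw [if_pos ⟨ht, hc'⟩]
        rw [ih]
        rw [PySem.Dict.items_insert_of_not_contains _ _ hc']
        have hfilt :
            (cards.filterMap pvExtract).filter
              (fun p => !(d.insert (PySem.Str.strip (((PySem.Dict.mk card).get? "name").getD ""))
                (((PySem.Dict.mk card).get? "desc").getD "")).contains p.1)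
            = ((cards.filterMap pvExtract).filter (fun p => !d.contains p.1)).filter
                (fun p => decide (p.1 ≠ PySem.Str.strip (((PySem.Dict.mk card).get? "name").getD ""))) := by
          rw [List.filter_filter]
          refine List.filter_congr ?_
          intro q _
          rw [PySem.Dict.contains_insert]
          by_cases hq : q.1 = PySem.Str.strip (((PySem.Dict.mk card).get? "name").getD "")
          · simp [hq]
          · simp [hq, beq_false_of_ne hq]
        rw [hfilt,
          pvDedup_filter_key (fun k => decide (k ≠ PySem.Str.strip (((PySem.Dict.mk card).get? "name").getD "")))]
        simp [hc', pvDedup]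

theorem pvA_eq (cards : List (List (String × String))) :
    build_card_description_by_title_py cards = pvDedup (cards.filterMap pvExtract) := by
  unfold build_card_description_by_title_py
  rw [pvA_inv]
  simp [pvExtract, PySem.Dict.empty]

-- first-match lookup in a pair list
def pvFind (l : List (String × String)) (t : String) : Option String :=
  (l.find? (fun p => p.1 == t)).map (fun p => p.2)

theorem pvGet?_ofList_reverse (l : List (String × String)) (t : String) :
    (PySem.Dict.ofList l.reverse).get? t = pvFind l t := by
  induction l with
  | nil =>
    simp [pvFind, PySem.Dict.ofList, PySem.Dict.update, PySem.Dict.empty, PySem.Dict.get?]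
  | cons p l ih =>
    have h : PySem.Dict.ofList ((p :: l).reverse)
        = (PySem.Dict.ofList l.reverse).insert p.1 p.2 := by
      simp [PySem.Dict.ofList, PySem.Dict.update, List.reverse_cons, List.foldl_append]
    rw [h, PySem.Dict.get?_insert, pvFind, List.find?_cons]
    by_cases hp : p.1 = t
    · simp [hp]
    · have hp' : ¬ t = p.1 := fun e => hp e.symm
      simp [pvFind, hp', beq_false_of_ne hp, ih]

theorem pvFind_of_mem_pvDedup :
    ∀ (l : List (String × String)) (p : String × String), p ∈ pvDedup l → pvFind l p.1 = some p.2 := by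
  intro l
  induction l with
  | nil => intro p h; simp [pvDedup] at h
  | cons q l ih =>
    intro p hp
    simp only [pvDedup, List.mem_cons, List.mem_filter] at hp
    rcases hp with rfl | ⟨hmem, hne⟩
    · simp [pvFind]
    · have hne' : p.1 ≠ q.1 := by simpa using hne
      rw [pvFind, List.find?_cons]
      simpa [pvFind, beq_false_of_ne (Ne.symm hne')] using ih p hmem

theorem pvDedup_map_fst (l : List (String × String)) :
    PySem.Set.ofList (l.map (fun p => p.1)) = (pvDedup l).map (fun p => p.1) := by
  suffices h : ∀ (l : List (String × String)) (s : List String),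
      List.foldl PySem.Set.add s (l.map (fun p => p.1))
        = s ++ ((pvDedup l).filter (fun q => !s.contains q.1)).map (fun p => p.1) by
    have := h l []
    simpa [PySem.Set.ofList, PySem.Set.empty, List.filter_eq_self.mpr] using this
  intro l
  induction l with
  | nil => intro s; simp [pvDedup]
  | cons p l ih =>
    intro s
    simp only [List.map_cons, List.foldl_cons, PySem.Set.add, PySem.Set.contains, pvDedup,
      List.filter_cons]
    by_cases hc : s.contains p.1 = true
    · rw [if_pos hc]
      simp only [hc, Bool.not_true, Bool.false_eq_true, if_false, ih, List.filter_filter]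
      refine congrArg (s ++ ·) (congrArg _ (List.filter_congr ?_))
      intro q _
      by_cases hq : s.contains q.1 = true
      · have hqm : q.1 ∈ s := by simpa using hq
        simp [hqm]
      · have hqp : q.1 ≠ p.1 := fun e => by rw [e, hc] at hq; exact hq rfl
        simp [hqp]
    · have hc' : s.contains p.1 = false := by simpa using hc
      rw [if_neg (by simpa using hc')]
      simp only [hc', Bool.not_false, if_pos trivial, ih, List.filter_filter]
      rw [List.append_assoc, List.singleton_append, List.map_cons]
      refine congrArg (s ++ ·) (congrArg (p.1 :: ·) (congrArg _ (List.filter_congr ?_)))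
      intro q _
      rw [List.contains_append]
      by_cases hq : s.contains q.1 = true
      · have hqm : q.1 ∈ s := by simpa using hq
        simp [hqm]
      · by_cases hqp : q.1 = p.1
        · simp [hqp]
        · simp [hqp]

theorem pvNodup_dedup_fst (l : List (String × String)) :
    ((pvDedup l).map (fun p => p.1)).Nodup := by
  rw [← pvDedup_map_fst]
  exact PySem.Set.nodup_ofList _

theorem pvItems_ofList (l : List (String × String)) (h : (l.map (fun p => p.1)).Nodup) :
    (PySem.Dict.ofList l).items = l := by
  have h0 : ∀ p ∈ l, (PySem.Dict.empty : PySem.Dict String String).contains p.1 = false := by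
    intro p _; exact PySem.Dict.contains_empty _
  have := PySem.Dict.items_foldl_insert_fresh l (fun p => p.1) (fun p => p.2)
    (PySem.Dict.empty : PySem.Dict String String) h0 h
  simpa [PySem.Dict.ofList, PySem.Dict.update, PySem.Dict.empty] using this

theorem pvB_eq (cards : List (List (String × String))) :
    build_card_description_by_title_py_alt cards = pvDedup (cards.filterMap pvExtract) := by
  have hrepr : build_card_description_by_title_py_alt cards
      = (PySem.Dict.ofList
          ((PySem.List.dedup ((cards.filterMap pvExtract).map (fun p => p.1))).map
            (fun t => (t, ((PySem.Dict.ofList (cards.filterMap pvExtract).reverse).get? t).getD "")))).items := by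
    rfl
  rw [hrepr]
  set l := cards.filterMap pvExtract with hl
  have hkeys : PySem.List.dedup (l.map (fun p => p.1)) = (pvDedup l).map (fun p => p.1) := by
    rw [PySem.List.dedup_eq_ofList]; exact pvDedup_map_fst l
  have hmapped :
      ((pvDedup l).map (fun p => p.1)).map
        (fun t => (t, ((PySem.Dict.ofList l.reverse).get? t).getD "")) = pvDedup l := by
    rw [List.map_map]
    have hpt : ∀ p ∈ pvDedup l,
        ((fun t => (t, ((PySem.Dict.ofList l.reverse).get? t).getD "")) ∘ fun p => p.1) p = p := by
      intro p hp
      have := pvFind_of_mem_pvDedup l p hp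
      simp [Function.comp, pvGet?_ofList_reverse, this]
    calc ((pvDedup l).map ((fun t => (t, ((PySem.Dict.ofList l.reverse).get? t).getD "")) ∘ fun p => p.1))
        = (pvDedup l).map id := List.map_congr_left hpt
      _ = pvDedup l := List.map_id _
  rw [hkeys, pvItems_ofList, hmapped]
  rw [hmapped]
  exact pvNodup_dedup_fst l

-- ===== VERDICT (by name: the statement is the Claim_ definition above) =====
theorem build_card_description_by_title_py_spec : Claim_equal_build_card_description_by_title_py := by
  intro cards _
  unfold Spec_build_card_description_by_title_py
  rw [pvA_eq, pvB_eq]
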